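-- pv_equiv track=rewrite | github.com/FacundoGazar/Taller-de-Tecnologias-de-Prod-Soft---Opci-n-T-cnicas-y-Estrategias | Hartals/challenge.py | total_hartals
-- ===== SOURCE A (Python) =====
-- def is_holiday(day):
--     '''
--         Empezando como si domingo fuera el dia 0, cuenta si el dia pasado como parametro es viernes o sabado
--     '''
--     return (day % 7 == 6) or (day % 7 == 5)
--
-- def total_hartals(N, P):
--     '''
--         Retorna la cantidad total de hartals en la cantidad de dias (N) teniendo en cuenta la frecuencia (P[i])
--     '''
--
--     aux_calendar = [0 for _ in range(N)] # Vector contador, lo inicializo en 0.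
--
--     for hartal_freq in P:
--         hartal_day = hartal_freq
--         while(hartal_day <= N):
--             aux_calendar[hartal_day-1] = 1
--             hartal_day += hartal_freq
--
--     for day in range(N):
--         if(is_holiday(day)):
--             aux_calendar[day] = 0
--
--     return sum(aux_calendar)
-- ===== SOURCE B (Python) =====
-- def total_hartals(N, P):
--     return sum(1 for d in range(1, N + 1)
--                if (d - 1) % 7 != 5 and (d - 1) % 7 != 6
--                and any(d % p == 0 for p in P))
-- ===== Notes on version B (the rewrite author's own statement) =====
-- stated objective: simpler
-- what changed: Replaced the sieve (mark multiples of each frequency in a counter array, then zero out holidays, then sum) with a single pass over day numbers 1..N that counts a day when it is divisible by some frequency and not a Friday/Saturday, maintaining no array at all.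
-- outside the precondition, e.g. on total_hartals(-1, [0]): A returns 0, B returns 0; on total_hartals(-5, [-2]): A returns 0, B returns 0
import Mathlib
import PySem

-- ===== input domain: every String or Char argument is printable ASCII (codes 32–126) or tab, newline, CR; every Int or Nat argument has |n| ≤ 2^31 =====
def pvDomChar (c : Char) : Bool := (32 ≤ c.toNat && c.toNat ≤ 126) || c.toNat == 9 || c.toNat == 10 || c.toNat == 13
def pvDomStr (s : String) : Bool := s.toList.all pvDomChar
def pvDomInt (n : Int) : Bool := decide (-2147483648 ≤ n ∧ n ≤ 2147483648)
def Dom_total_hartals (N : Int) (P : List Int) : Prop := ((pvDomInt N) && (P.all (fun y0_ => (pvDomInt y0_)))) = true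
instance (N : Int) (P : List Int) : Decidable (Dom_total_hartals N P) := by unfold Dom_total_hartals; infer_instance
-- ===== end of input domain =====

-- B replaces A's sieve (mark multiples of each frequency in a counter array, zero holidays, sum)
-- with a single arrayless pass over day numbers 1..N counting divisible non-holiday days (objective: simpler).

-- ===== PORT A =====
def is_holiday (day : Int) : Bool :=
  (PySem.Int.mod day 7 == 6) || (PySem.Int.mod day 7 == 5)

-- A's inner while loop. Python diverges when hartal_freq ≤ 0 ≤ … (excluded by Pre_);
-- the `1 ≤ freq` conjunct in the guard only makes the recursion terminate there.
def markLoop (N freq day : Int) (cal : Array Int) : Array Int :=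
  if _h : 1 ≤ freq ∧ day ≤ N then
    markLoop N freq (day + freq) (cal.setIfInBounds (day - 1).toNat 1)
  else cal
termination_by (N + 1 - day).toNat
decreasing_by omega

def total_hartals (N : Int) (P : List Int) : Int :=
  ((List.range N.toNat).foldl
    (fun cal (day : ℕ) => if is_holiday (day : Int) then cal.setIfInBounds day 0 else cal)
    (P.foldl (fun cal freq => markLoop N freq freq cal)
      (Array.replicate N.toNat (0 : Int)))).foldl (fun acc x => acc + x) 0

-- ===== PORT B =====
def total_hartals_alt (N : Int) (P : List Int) : Int :=
  (PySem.List.pyRange 1 (N + 1) 1).foldl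
    (fun acc d =>
      if PySem.Int.mod (d - 1) 7 ≠ 5 ∧ PySem.Int.mod (d - 1) 7 ≠ 6 ∧
          P.any (fun p => PySem.Int.mod d p == 0) then acc + 1 else acc)
    0

-- ===== PRECONDITION & SPEC =====
-- Pre_ excludes non-positive frequencies: A's marking loop never terminates when such a
-- frequency is ≤ N (and Python B's `d % p` would raise ZeroDivisionError for p = 0);
-- when every non-positive frequency exceeds N, A happens to return (skipping it) — those
-- inputs are excluded too, since the same sign condition covers both.
def Pre_total_hartals (N : Int) (P : List Int) : Prop := ∀ p ∈ P, 1 ≤ p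
instance (N : Int) (P : List Int) : Decidable (Pre_total_hartals N P) := by
  unfold Pre_total_hartals; infer_instance

def pvWitness_total_hartals : Int × List Int := (10, [3, 4])

def Spec_total_hartals (N : Int) (P : List Int) (out : Int) : Prop := out = total_hartals_alt N P
instance (N : Int) (P : List Int) (out : Int) : Decidable (Spec_total_hartals N P out) := by
  unfold Spec_total_hartals; infer_instance

-- ===== CLAIM (what is proved, stated in full; the proofs are below) =====
def Claim_equal_total_hartals : Prop := ∀ (N : Int) (P : List Int), Dom_total_hartals N P → Pre_total_hartals N P → Spec_total_hartals N P (total_hartals N P)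

-- ===== LEMMAS AND PROOFS =====

def dayCond (P : List Int) (i : ℕ) : Bool :=
  !is_holiday (i : Int) && P.any (fun p => PySem.Int.mod ((i : Int) + 1) p == 0)

theorem markLoop_size (N freq day : Int) (cal : Array Int) :
    (markLoop N freq day cal).size = cal.size := by
  fun_induction markLoop <;> simp_all

theorem markLoop_getElem? (N freq : Int) (hf : 1 ≤ freq) (day : Int) (cal : Array Int)
    (i : ℕ) (hday : 1 ≤ day) (hlen : cal.size = N.toNat) :
    (markLoop N freq day cal)[i]? =
      if day ≤ (i : Int) + 1 ∧ (i : Int) + 1 ≤ N ∧ freq ∣ ((i : Int) + 1 - day)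
      then some 1 else cal[i]? := by
  fun_induction markLoop N freq day cal with
  | case1 day cal h ih =>
    rw [ih (by omega) (by simpa using hlen)]
    by_cases hc : (i : Int) + 1 = day
    · have hidx : (day - 1).toNat = i := by omega
      have hilt : i < cal.size := by omega
      rw [if_neg (by rintro ⟨h1, _⟩; omega), hidx,
        Array.getElem?_setIfInBounds_self_of_lt hilt,
        if_pos ⟨by omega, by omega, by rw [hc]; simp⟩]
    · have hne : (day - 1).toNat ≠ i := by omega
      rw [Array.getElem?_setIfInBounds_ne hne]
      have hiff : (day + freq ≤ (i : Int) + 1 ∧ (i : Int) + 1 ≤ N ∧ freq ∣ (i : Int) + 1 - (day + freq)) ↔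
          (day ≤ (i : Int) + 1 ∧ (i : Int) + 1 ≤ N ∧ freq ∣ (i : Int) + 1 - day) := by
        constructor
        · rintro ⟨h1, h2, h3⟩
          refine ⟨by omega, h2, ?_⟩
          have he : (i : Int) + 1 - day = ((i : Int) + 1 - (day + freq)) + freq := by ring
          rw [he]; exact dvd_add h3 (dvd_refl freq)
        · rintro ⟨h1, h2, h3⟩
          have hpos : 0 < (i : Int) + 1 - day := by omega
          have hle : freq ≤ (i : Int) + 1 - day := Int.le_of_dvd hpos h3
          refine ⟨by omega, h2, ?_⟩
          have he : (i : Int) + 1 - (day + freq) = ((i : Int) + 1 - day) - freq := by ring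
          rw [he]; exact dvd_sub h3 (dvd_refl freq)
      simp only [hiff]
  | case2 day cal h =>
    rw [if_neg (by rintro ⟨h1, h2, _⟩; omega)]

theorem foldP_size (N : Int) (P : List Int) (cal : Array Int) :
    (P.foldl (fun cal freq => markLoop N freq freq cal) cal).size = cal.size := by
  induction P generalizing cal with
  | nil => rfl
  | cons p P ih => rw [List.foldl_cons, ih, markLoop_size]

theorem foldP_getElem? (N : Int) (P : List Int) (hP : ∀ p ∈ P, 1 ≤ p) (cal : Array Int)
    (i : ℕ) (hlen : cal.size = N.toNat) :
    (P.foldl (fun cal freq => markLoop N freq freq cal) cal)[i]? =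
      if (∃ p ∈ P, p ∣ ((i : Int) + 1)) ∧ (i : Int) + 1 ≤ N
      then some 1 else cal[i]? := by
  induction P generalizing cal with
  | nil => simp
  | cons p P ih =>
    have hp : 1 ≤ p := hP p List.mem_cons_self
    rw [List.foldl_cons, ih (fun q hq => hP q (List.mem_cons_of_mem _ hq)) _
        (by rw [markLoop_size]; exact hlen),
      markLoop_getElem? N p hp p cal i hp hlen]
    by_cases hA : (∃ q ∈ P, q ∣ ((i : Int) + 1)) ∧ (i : Int) + 1 ≤ N
    · rw [if_pos hA, if_pos]
      obtain ⟨⟨q, hq, hd⟩, h2⟩ := hA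
      exact ⟨⟨q, List.mem_cons_of_mem _ hq, hd⟩, h2⟩
    · rw [if_neg hA]
      have hiff : (p ≤ (i : Int) + 1 ∧ (i : Int) + 1 ≤ N ∧ p ∣ ((i : Int) + 1 - p)) ↔
          ((∃ q ∈ p :: P, q ∣ ((i : Int) + 1)) ∧ (i : Int) + 1 ≤ N) := by
        constructor
        · rintro ⟨h1, h2, h3⟩
          refine ⟨⟨p, List.mem_cons_self, ?_⟩, h2⟩
          have he : (i : Int) + 1 = ((i : Int) + 1 - p) + p := by ring
          rw [he]; exact dvd_add h3 (dvd_refl p)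
        · rintro ⟨⟨q, hq, hd⟩, h2⟩
          rcases List.mem_cons.mp hq with rfl | hqP
          · have hle : q ≤ (i : Int) + 1 := Int.le_of_dvd (by omega) hd
            refine ⟨hle, h2, ?_⟩
            exact dvd_sub hd (dvd_refl q)
          · exact absurd ⟨⟨q, hqP, hd⟩, h2⟩ hA
      simp only [hiff]

theorem hfold_size (cal : Array Int) (n : ℕ) :
    ((List.range n).foldl
      (fun cal (day : ℕ) => if is_holiday (day : Int) then cal.setIfInBounds day 0 else cal) cal).size
      = cal.size := by
  induction n generalizing cal with
  | zero => rfl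
  | succ n ih =>
    rw [List.range_succ, List.foldl_append, List.foldl_cons, List.foldl_nil]
    by_cases hh : is_holiday (n : Int)
    · rw [if_pos hh, Array.size_setIfInBounds, ih]
    · rw [if_neg hh, ih]

theorem hfold_getElem? (n : ℕ) (cal : Array Int) (hn : n ≤ cal.size) (i : ℕ) :
    ((List.range n).foldl
      (fun cal (day : ℕ) => if is_holiday (day : Int) then cal.setIfInBounds day 0 else cal) cal)[i]? =
      if i < n ∧ is_holiday (i : Int) = true then some 0 else cal[i]? := by
  induction n with
  | zero => simp
  | succ n ih =>
    rw [List.range_succ, List.foldl_append, List.foldl_cons, List.foldl_nil]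
    by_cases hh : is_holiday (n : Int)
    · rw [if_pos hh]
      by_cases hi : i = n
      · subst hi
        rw [Array.getElem?_setIfInBounds_self_of_lt (by rw [hfold_size]; omega),
          if_pos ⟨by omega, hh⟩]
      · rw [Array.getElem?_setIfInBounds_ne (Ne.symm hi), ih (by omega)]
        have : (i < n ∧ is_holiday (i : Int) = true) ↔
            (i < n + 1 ∧ is_holiday (i : Int) = true) := by
          constructor
          · rintro ⟨h1, h2⟩; exact ⟨by omega, h2⟩
          · rintro ⟨h1, h2⟩; exact ⟨by omega, h2⟩
        simp only [this]
    · rw [if_neg hh, ih (by omega)]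
      have : (i < n ∧ is_holiday (i : Int) = true) ↔
          (i < n + 1 ∧ is_holiday (i : Int) = true) := by
        constructor
        · rintro ⟨h1, h2⟩; exact ⟨by omega, h2⟩
        · rintro ⟨h1, h2⟩
          have : i ≠ n := by rintro rfl; exact hh h2
          exact ⟨by omega, h2⟩
      simp only [this]

theorem dvd_iff_any (P : List Int) (d : Int) :
    (P.any (fun p => PySem.Int.mod d p == 0)) = true ↔ ∃ p ∈ P, p ∣ d := by
  simp [List.any_eq_true, PySem.Int.mod_eq_zero_iff_dvd]

theorem final_eq_map (N : Int) (P : List Int) (hP : ∀ p ∈ P, 1 ≤ p) :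
    ((List.range N.toNat).foldl
      (fun cal (day : ℕ) => if is_holiday (day : Int) then cal.setIfInBounds day 0 else cal)
      (P.foldl (fun cal freq => markLoop N freq freq cal) (Array.replicate N.toNat (0 : Int))))
    = ((List.range N.toNat).map (fun i => if dayCond P i then (1 : Int) else 0)).toArray := by
  apply Array.ext_getElem?
  intro i
  rw [hfold_getElem? _ _ (by rw [foldP_size]; simp) i,
    foldP_getElem? N P hP _ i (by simp)]
  by_cases hi : i < N.toNat
  · have hle : (i : Int) + 1 ≤ N := by omega
    simp only [List.getElem?_toArray, List.getElem?_map, List.getElem?_range hi,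
      Option.map_some]
    by_cases hh : is_holiday (i : Int)
    · rw [if_pos ⟨hi, hh⟩]
      have : dayCond P i = false := by simp [dayCond, hh]
      rw [this]; simp
    · rw [if_neg (by rintro ⟨_, h2⟩; exact hh h2)]
      by_cases hd : ∃ p ∈ P, p ∣ ((i : Int) + 1)
      · rw [if_pos ⟨hd, hle⟩]
        have : dayCond P i = true := by
          simp only [dayCond, Bool.and_eq_true, Bool.not_eq_true']
          exact ⟨by simpa using hh, (dvd_iff_any P _).mpr hd⟩
        rw [this]; simp
      · rw [if_neg (by rintro ⟨h1, _⟩; exact hd h1)]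
        have : dayCond P i = false := by
          simp only [dayCond, Bool.and_eq_false_iff]
          right
          simpa using fun p hp => (fun h => hd ⟨p, hp, h⟩) ∘ (PySem.Int.mod_eq_zero_iff_dvd _ _).mp
        rw [this]
        simp [hi]
  · have h1 : ¬ ((i : Int) + 1 ≤ N) := by omega
    rw [if_neg (by rintro ⟨h, _⟩; omega), if_neg (by rintro ⟨_, h⟩; exact h1 h)]
    simp [(by omega : ¬ i < N.toNat)]

theorem pyRange_eq_map (n : ℕ) :
    PySem.List.pyRange 1 ((n : Int) + 1) 1 = (List.range n).map (fun (i : ℕ) => (i : Int) + 1) := by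
  induction n with
  | zero => simp [PySem.List.pyRange_one_eq_nil]
  | succ n ih =>
    have : ((n : Int) + 1 : Int) + 1 = (((n : ℕ) + 1 : ℕ) : Int) + 1 := by push_cast; ring
    rw [show (((n : ℕ) + 1 : ℕ) : Int) + 1 = ((n : Int) + 1) + 1 by push_cast; ring,
      PySem.List.pyRange_one_succ_right (by omega), ih, List.range_succ, List.map_append]
    simp

theorem alt_eq_sum (N : Int) (P : List Int) :
    total_hartals_alt N P
      = ((List.range N.toNat).map (fun i => if dayCond P i then (1 : Int) else 0)).sum := by
  unfold total_hartals_alt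
  by_cases hN : N ≤ 0
  · rw [PySem.List.pyRange_one_eq_nil (by omega)]
    have : N.toNat = 0 := by omega
    rw [this]; simp
  · have hcast : N + 1 = ((N.toNat : Int)) + 1 := by omega
    rw [hcast, pyRange_eq_map, List.foldl_map]
    have hstep : (fun (acc : Int) (i : ℕ) =>
        if PySem.Int.mod ((i : Int) + 1 - 1) 7 ≠ 5 ∧ PySem.Int.mod ((i : Int) + 1 - 1) 7 ≠ 6 ∧
            P.any (fun p => PySem.Int.mod ((i : Int) + 1) p == 0) then acc + 1 else acc)
        = (fun (acc : Int) (i : ℕ) => if dayCond P i then acc + 1 else acc) := by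
      funext acc i
      have hsimp : (i : Int) + 1 - 1 = (i : Int) := by ring
      have hcond : (PySem.Int.mod ((i : Int) + 1 - 1) 7 ≠ 5 ∧ PySem.Int.mod ((i : Int) + 1 - 1) 7 ≠ 6 ∧
          P.any (fun p => PySem.Int.mod ((i : Int) + 1) p == 0) = true) ↔ dayCond P i = true := by
        rw [hsimp]
        simp only [dayCond, Bool.and_eq_true, Bool.not_eq_true', is_holiday]
        constructor
        rw [PySem.Int.mod_eq_emod_of_pos (show (0:Int) < 7 by norm_num)]
        · rintro ⟨h5, h6, ha⟩
          exact ⟨by simp [h5, h6], ha⟩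
        · rintro ⟨hb, ha⟩
          simp only [Bool.or_eq_false_iff, beq_eq_false_iff_ne] at hb
          exact ⟨hb.2, hb.1, ha⟩
      exact if_congr hcond rfl rfl
    rw [hstep, PySem.List.foldl_count_if (fun i => dayCond P i) (List.range N.toNat) 0,
      PySem.List.sum_map_ite_one_zero]
    simp

-- ===== VERDICT (by name: the statement is the Claim_ definition above) =====
theorem total_hartals_spec : Claim_equal_total_hartals := by
  intro N P _hD hP
  unfold Spec_total_hartals total_hartals
  rw [final_eq_map N P hP, alt_eq_sum N P, List.foldl_toArray, List.sum_eq_foldl]
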